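-- pv_equiv track=rewrite | github.com/Aryan-d13/templatea | template_engine.py | find_phrase_positions
-- ===== SOURCE A (Python) =====
-- from typing import Tuple, List, Optional, Dict, Any
--
-- def find_phrase_positions(lines: List[str], phrase: List[str]) -> List[Tuple[int, int, int]]:
--     positions = []
--     all_words = []
--     for line_idx, line in enumerate(lines):
--         words = line.split()
--         for word_idx, word in enumerate(words):
--             cleaned = word.strip(".,!?:;\"'()[]{}").lower()
--             all_words.append((line_idx, word_idx, word, cleaned))
--     phrase_clean = [w.strip(".,!?:;\"'()[]{}").lower() for w in phrase]
--     phrase_len = len(phrase_clean)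
--     i = 0
--     while i <= len(all_words) - phrase_len:
--         match = True
--         for j in range(phrase_len):
--             if all_words[i + j][3] != phrase_clean[j]:
--                 match = False
--                 break
--         if match:
--             start_line = all_words[i][0]
--             end_line = all_words[i + phrase_len - 1][0]
--             if start_line == end_line:
--                 positions.append((start_line, all_words[i][1], all_words[i + phrase_len - 1][1]))
--             else:
--                 current_line = start_line
--                 for k in range(phrase_len):
--                     word_line = all_words[i + k][0]
--                     word_pos = all_words[i + k][1]
--                     if word_line != current_line:
--                         current_line = word_line
--                     positions.append((word_line, word_pos, word_pos))
--             i += phrase_len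
--         else:
--             i += 1
--     return positions
-- ===== SOURCE B (Python) =====
-- def find_phrase_positions(lines, phrase):
--     STRIP = ".,!?:;\"'()[]{}"
--     toks = [(li, wi, w.strip(STRIP).lower())
--             for li, line in enumerate(lines)
--             for wi, w in enumerate(line.split())]
--     pat = [w.strip(STRIP).lower() for w in phrase]
--     m = len(pat)
--
--     def step(q, c):
--         # KMP automaton transition from state q on token c
--         while q and c != pat[q]:
--             q = fail[q - 1]
--         return q + 1 if c == pat[q] else q
--
--     # failure table: fail[j] = length of the longest proper border of pat[:j+1]
--     fail = [0]
--     k = 0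
--     for q in range(1, m):
--         k = step(k, pat[q])
--         fail.append(k)
--
--     out = []
--     q = 0
--     for i, t in enumerate(toks):
--         q = step(q, t[2])
--         if q == m:  # full match ending at token i; reset (non-overlapping)
--             window = toks[i + 1 - m:i + 1]
--             if window[0][0] == t[0]:
--                 out.append((t[0], window[0][1], t[1]))
--             else:
--                 out.extend((x[0], x[1], x[1]) for x in window)
--             q = 0
--     return out
-- ===== Notes on version B (the rewrite author's own statement) =====
-- stated objective: alternative
-- what changed: B replaces A's restart-on-mismatch sliding-window scan over the flattened token list by a Knuth-Morris-Pratt automaton: it builds the failure table of the cleaned phrase and finds the same non-overlapping matches in a single pass with state reset after each match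
import Mathlib
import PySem

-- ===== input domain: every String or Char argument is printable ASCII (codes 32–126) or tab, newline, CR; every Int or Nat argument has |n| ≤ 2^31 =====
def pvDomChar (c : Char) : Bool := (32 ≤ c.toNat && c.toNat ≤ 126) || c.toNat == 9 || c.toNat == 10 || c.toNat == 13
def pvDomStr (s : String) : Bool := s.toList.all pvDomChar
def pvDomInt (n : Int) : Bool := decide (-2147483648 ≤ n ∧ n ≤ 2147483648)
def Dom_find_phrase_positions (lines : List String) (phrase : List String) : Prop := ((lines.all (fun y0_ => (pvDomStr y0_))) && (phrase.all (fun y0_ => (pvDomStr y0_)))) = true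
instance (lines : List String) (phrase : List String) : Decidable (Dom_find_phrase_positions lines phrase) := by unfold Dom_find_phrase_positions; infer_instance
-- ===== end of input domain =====

-- B replaces A's restart-on-mismatch sliding-window scan by a Knuth–Morris–Pratt automaton
-- over the cleaned token stream (failure table + single left-to-right pass, state reset after
-- each match for A's non-overlapping semantics).  Objective: an alternative algorithm.

-- ===== PORT A =====
def pvStrip : String := ".,!?:;\"'()[]{}"

def pvCleanA (w : String) : String := PySem.Str.lower (PySem.Str.stripChars w pvStrip)

-- all_words: (line_idx, word_idx, word, cleaned) built by the two nested enumerate loops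
def pvAllWords (lines : List String) : List (Int × Int × String × String) :=
  (PySem.List.enumerate lines).foldl
    (fun acc le =>
      (PySem.List.enumerate (PySem.Str.split₀ le.2)).foldl
        (fun acc2 we => acc2 ++ [(le.1, we.1, we.2, pvCleanA we.2)]) acc) []

-- all_words[p] (always in range inside Pre_)
def pvGetA (aw : List (Int × Int × String × String)) (p : Nat) : Int × Int × String × String :=
  aw.getD p (0, 0, "", "")

-- A's while loop; fuel = aw.length + 1 bounds the iterations (i grows each step when phrase ≠ []).
-- A's local 'current_line' is assigned but never read; the port omits this dead variable.
def pvLoopA (aw : List (Int × Int × String × String)) (pat : List String) (m n : Nat) :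
    Nat → List (Int × Int × Int) → Nat → List (Int × Int × Int)
  | _, acc, 0 => acc
  | i, acc, fuel+1 =>
    if i + m ≤ n then
      if (List.range m).all (fun j => (pvGetA aw (i+j)).2.2.2 == pat.getD j "") then
        pvLoopA aw pat m n (i+m)
          (if (pvGetA aw i).1 == (pvGetA aw (i+m-1)).1 then
            acc ++ [((pvGetA aw i).1, (pvGetA aw i).2.1, (pvGetA aw (i+m-1)).2.1)]
          else
            (List.range m).foldl
              (fun a k => a ++ [((pvGetA aw (i+k)).1, (pvGetA aw (i+k)).2.1, (pvGetA aw (i+k)).2.1)]) acc) fuel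
      else pvLoopA aw pat m n (i+1) acc fuel
    else acc

def find_phrase_positions (lines : List String) (phrase : List String) : List (Int × Int × Int) :=
  let aw := pvAllWords lines
  let pat := phrase.map pvCleanA
  pvLoopA aw pat pat.length aw.length 0 [] (aw.length + 1)

-- ===== PORT B =====
def pvCleanB (w : String) : String := PySem.Str.lower (PySem.Str.stripChars w pvStrip)

-- toks: [(li, wi, clean(w)) for li, line in enumerate(lines) for wi, w in enumerate(line.split())]
def pvToksB (lines : List String) : List (Int × Int × String) :=
  (PySem.List.enumerate lines).flatMap
    (fun le => (PySem.List.enumerate (PySem.Str.split₀ le.2)).map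
      (fun we => (le.1, we.1, pvCleanB we.2)))

-- 'while q and c != pat[q]: q = fail[q-1]'; fuel q suffices since fail[j] ≤ j
def pvWhileB (p : List String) (fail : List Nat) (c : String) : Nat → Nat → Nat
  | 0, k => k
  | fuel+1, k => if k != 0 && !(c == p.getD k "") then pvWhileB p fail c fuel (fail.getD (k-1) 0) else k

-- Source B's step(q, c): KMP automaton transition
def pvStepB (p : List String) (fail : List Nat) (q : Nat) (c : String) : Nat :=
  let k := pvWhileB p fail c q q
  if c == p.getD k "" then k + 1 else k

-- fail = [0]; k = 0; for q in range(1, m): k = step(k, pat[q]); fail.append(k)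
def pvFailB (p : List String) : List Nat :=
  ((PySem.List.pyRange 1 (p.length : Int) 1).foldl
    (fun (st : List Nat × Nat) q =>
      let k := pvStepB p st.1 st.2 (PySem.List.pyGetD p q "")
      (st.1 ++ [k], k))
    ([0], 0)).1

-- the scan: for i, t in enumerate(toks): q = step(q, t[2]); if q == m: emit window; q = 0
def pvScanB (p : List String) (fail : List Nat) (m : Nat) (toksAll : List (Int × Int × String)) :
    List (Int × Int × String) → Nat → Nat → List (Int × Int × Int) → List (Int × Int × Int)
  | [], _, _, out => out
  | t :: rest, i, q0, out =>
    if pvStepB p fail q0 t.2.2 == m then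
      pvScanB p fail m toksAll rest (i+1) 0
        (if (PySem.List.pyGetD (PySem.List.slice toksAll (some ((i : Int) + 1 - (m : Int))) (some ((i : Int) + 1))) 0 ((0:Int), (0:Int), "")).1 == t.1 then
          out ++ [(t.1, (PySem.List.pyGetD (PySem.List.slice toksAll (some ((i : Int) + 1 - (m : Int))) (some ((i : Int) + 1))) 0 ((0:Int), (0:Int), "")).2.1, t.2.1)]
         else out ++ (PySem.List.slice toksAll (some ((i : Int) + 1 - (m : Int))) (some ((i : Int) + 1))).map (fun x => (x.1, x.2.1, x.2.1)))
    else pvScanB p fail m toksAll rest (i+1) (pvStepB p fail q0 t.2.2) out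

def find_phrase_positions_alt (lines : List String) (phrase : List String) : List (Int × Int × Int) :=
  let toks := pvToksB lines
  let pat := phrase.map pvCleanB
  let fail := pvFailB pat
  pvScanB pat fail pat.length toks toks 0 0 []

-- ===== PRECONDITION & SPEC =====
-- Pre_ excludes only phrase = [], on which A raises IndexError (no words) or loops forever (i += 0).
def Pre_find_phrase_positions (lines : List String) (phrase : List String) : Prop := phrase ≠ []
instance (lines : List String) (phrase : List String) : Decidable (Pre_find_phrase_positions lines phrase) := by
  unfold Pre_find_phrase_positions; infer_instance

def pvWitness_find_phrase_positions : List String × List String := (["hello world! foo", "the hello world"], ["Hello", "world"])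

def Spec_find_phrase_positions (lines : List String) (phrase : List String) (out : List (Int × Int × Int)) : Prop := out = find_phrase_positions_alt lines phrase
instance (lines : List String) (phrase : List String) (out : List (Int × Int × Int)) : Decidable (Spec_find_phrase_positions lines phrase out) := by unfold Spec_find_phrase_positions; infer_instance

-- ===== CLAIM (what is proved, stated in full; the proofs are below) =====
def Claim_equal_find_phrase_positions : Prop := ∀ (lines : List String) (phrase : List String), Dom_find_phrase_positions lines phrase → Pre_find_phrase_positions lines phrase → Spec_find_phrase_positions lines phrase (find_phrase_positions lines phrase)

-- ===== LEMMAS AND PROOFS =====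

-- projection relating B's token triples to A's 4-tuples
def pvProj (t : Int × Int × String × String) : Int × Int × String := (t.1, t.2.1, t.2.2.2)

theorem pvCleanB_eq : pvCleanB = pvCleanA := rfl

-- M(u): length of the longest prefix of p that is a suffix of u
def pvMf (p u : List String) : Nat := Nat.findGreatest (fun k => p.take k <:+ u) p.length

-- pi(q): length of the longest proper border of p.take q (for 1 <= q)
def pvPi (p : List String) (q : Nat) : Nat := Nat.findGreatest (fun k => p.take k <:+ p.take q) (q-1)

-- the abstract KMP transition
def pvNext (p : List String) (r : Nat) (c : String) : Nat :=
  Nat.findGreatest (fun k => 0 < k ∧ p.take (k-1) <:+ p.take r ∧ p.getD (k-1) "" = c) (r+1)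

-- the greedy non-overlapping match-start list (A's scan, abstracted)
def pvNaive (p text : List String) (i : Nat) : List Nat :=
  if h : i + p.length ≤ text.length ∧ 0 < p.length then
    if (text.drop i).take p.length = p then i :: pvNaive p text (i + p.length)
    else pvNaive p text (i+1)
  else []
termination_by text.length - i
decreasing_by all_goals omega

def pvTokD : Int × Int × String := (0, 0, "")

def pvEmit (toks : List (Int × Int × String)) (m : Nat) (s : Nat) : List (Int × Int × Int) :=
  if (((toks.drop s).take m).getD 0 pvTokD).1 == (((toks.drop s).take m).getD (m-1) pvTokD).1 then
    [((((toks.drop s).take m).getD 0 pvTokD).1, (((toks.drop s).take m).getD 0 pvTokD).2.1,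
      (((toks.drop s).take m).getD (m-1) pvTokD).2.1)]
  else ((toks.drop s).take m).map (fun x => (x.1, x.2.1, x.2.1))

def pvEmitAll (toks : List (Int × Int × String)) (m : Nat) (L : List Nat) : List (Int × Int × Int) :=
  L.flatMap (pvEmit toks m)

theorem pv_fg_ext {P Q : Nat → Prop} [DecidablePred P] [DecidablePred Q] {b b' : Nat}
    (h1 : ∀ k, 0 < k → k ≤ b → P k → k ≤ b' ∧ Q k)
    (h2 : ∀ k, 0 < k → k ≤ b' → Q k → k ≤ b ∧ P k) :
    Nat.findGreatest P b = Nat.findGreatest Q b' := by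
  rcases Nat.eq_zero_or_pos (Nat.findGreatest P b) with h0 | hpos
  · rcases Nat.eq_zero_or_pos (Nat.findGreatest Q b') with h0' | hpos'
    · omega
    · have hQ : Q (Nat.findGreatest Q b') := Nat.findGreatest_of_ne_zero rfl (by omega)
      obtain ⟨hle, hP⟩ := h2 _ hpos' (Nat.findGreatest_le _) hQ
      have := Nat.le_findGreatest hle hP
      omega
  · have hP : P (Nat.findGreatest P b) := Nat.findGreatest_of_ne_zero rfl (by omega)
    obtain ⟨hle, hQ⟩ := h1 _ hpos (Nat.findGreatest_le _) hP
    have ha := Nat.le_findGreatest hle hQ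
    have hpos' : 0 < Nat.findGreatest Q b' := by omega
    have hQ' : Q (Nat.findGreatest Q b') := Nat.findGreatest_of_ne_zero rfl (by omega)
    obtain ⟨hle', hP'⟩ := h2 _ hpos' (Nat.findGreatest_le _) hQ'
    have := Nat.le_findGreatest hle' hP'
    omega

theorem pv_suffix_of_suffix {α : Type} (a b s : List α) (h1 : a <:+ s) (h2 : b <:+ s)
    (h : a.length ≤ b.length) : a <:+ b := by
  obtain ⟨t1, ht1⟩ := h1
  obtain ⟨t2, ht2⟩ := h2
  have hlen : t2.length + b.length = t1.length + a.length := by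
    have := congrArg List.length (ht1.trans ht2.symm)
    simpa using this.symm
  have hts : t1.length = t2.length + (t1.length - t2.length) := by omega
  have key : a = b.drop (t1.length - t2.length) := by
    have : a = (t1 ++ a).drop t1.length := by simp
    rw [this, ht1, ← ht2, hts, List.drop_append]
    simp [List.drop_eq_nil_of_le]
  rw [key]
  exact List.drop_suffix _ _

theorem pv_take_suffix_snoc (p u : List String) (c : String) (k : Nat) (hk : 0 < k)
    (hkm : k ≤ p.length) :
    (p.take k <:+ u ++ [c]) ↔ (p.take (k-1) <:+ u ∧ p.getD (k-1) "" = c) := by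
  have hklt : k - 1 < p.length := by omega
  obtain ⟨k', rfl⟩ : ∃ k', k = k' + 1 := ⟨k - 1, by omega⟩
  simp only [Nat.add_sub_cancel] at hklt ⊢
  have hget : p.getD k' "" = p[k'] := List.getD_eq_getElem _ _ hklt
  have htake : p.take (k'+1) = p.take k' ++ [p[k']] := by
    rw [List.take_add_one, List.getElem?_eq_getElem hklt]
    rfl
  rw [htake, hget]
  constructor
  · intro h
    obtain ⟨t, ht⟩ := h
    rw [← List.append_assoc, ← List.concat_eq_append, ← List.concat_eq_append] at ht
    obtain ⟨he, hc⟩ := List.concat_inj.1 ht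
    exact ⟨⟨t, he⟩, hc⟩
  · rintro ⟨⟨t, ht⟩, hc⟩
    exact ⟨t, by rw [← List.append_assoc, ht, hc]⟩

theorem pvMf_suffix (p u : List String) : p.take (pvMf p u) <:+ u := by
  unfold pvMf
  rcases Nat.eq_zero_or_pos (Nat.findGreatest (fun k => p.take k <:+ u) p.length) with h0 | hpos
  · rw [h0]; exact List.nil_suffix
  · exact Nat.findGreatest_of_ne_zero rfl hpos.ne'

theorem pvMf_le (p u : List String) : pvMf p u ≤ p.length := Nat.findGreatest_le _

theorem pvMf_greatest (p u : List String) (k : Nat) (hk : k ≤ p.length)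
    (hs : p.take k <:+ u) : k ≤ pvMf p u := Nat.le_findGreatest hk hs

theorem pvPi_suffix (p : List String) (q : Nat) : p.take (pvPi p q) <:+ p.take q := by
  unfold pvPi
  rcases Nat.eq_zero_or_pos (Nat.findGreatest (fun k => p.take k <:+ p.take q) (q-1)) with h0 | hpos
  · rw [h0]; exact List.nil_suffix
  · exact Nat.findGreatest_of_ne_zero rfl hpos.ne'

theorem pvPi_le (p : List String) (q : Nat) : pvPi p q ≤ q - 1 := Nat.findGreatest_le _

theorem pvPi_greatest (p : List String) (q k : Nat) (hk : k ≤ q - 1)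
    (hs : p.take k <:+ p.take q) : k ≤ pvPi p q := Nat.le_findGreatest hk hs

theorem pvMf_nil (p : List String) (hm : 0 < p.length) : pvMf p [] = 0 := by
  apply Nat.findGreatest_eq_zero_iff.2
  intro n hn hle hs
  have := List.suffix_nil.1 hs
  have : (p.take n).length = 0 := by rw [this]; rfl
  rw [List.length_take] at this
  omega

theorem pv_snoc_max (p u : List String) (c : String) (r cap : Nat)
    (hru : p.take r <:+ u) (hmax : ∀ k, k < cap → p.take k <:+ u → k ≤ r)
    (hr1 : r + 1 ≤ cap) (hcap : cap ≤ p.length) :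
    Nat.findGreatest (fun k => p.take k <:+ u ++ [c]) cap = pvNext p r c := by
  apply pv_fg_ext
  · intro k hk hkb hP
    obtain ⟨hsu, hgc⟩ := (pv_take_suffix_snoc p u c k hk (le_trans hkb hcap)).1 hP
    have hkr : k - 1 ≤ r := hmax (k-1) (by omega) hsu
    refine ⟨by omega, hk, ?_, hgc⟩
    apply pv_suffix_of_suffix _ _ u hsu hru
    simp [List.length_take]; omega
  · intro k hk hkb hQ
    obtain ⟨-, hsu, hgc⟩ := hQ
    refine ⟨by omega, ?_⟩
    exact (pv_take_suffix_snoc p u c k hk (by omega)).2 ⟨hsu.trans hru, hgc⟩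

theorem pvMf_snoc (p u : List String) (c : String) (h : pvMf p u < p.length) :
    pvMf p (u ++ [c]) = pvNext p (pvMf p u) c := by
  unfold pvMf
  exact pv_snoc_max p u c (pvMf p u) p.length (pvMf_suffix p u)
    (fun k hk hs => pvMf_greatest p u k (by omega) hs) (by omega) le_rfl

theorem pvPi_succ (p : List String) (q : Nat) (h1 : 1 ≤ q) (h2 : q + 1 ≤ p.length) :
    pvPi p (q+1) = pvNext p (pvPi p q) (p.getD q "") := by
  have hq : q < p.length := by omega
  have htake : p.take (q+1) = p.take q ++ [p.getD q ""] := by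
    rw [List.take_add_one, List.getElem?_eq_getElem hq, List.getD_eq_getElem _ _ hq]
    rfl
  show Nat.findGreatest _ ((q+1)-1) = _
  simp only [Nat.add_sub_cancel]
  have : (fun k => p.take k <:+ p.take (q+1)) = (fun k => p.take k <:+ p.take q ++ [p.getD q ""]) := by
    rw [htake]
  rw [show (Nat.findGreatest (fun k => p.take k <:+ p.take (q+1)) q) = Nat.findGreatest (fun k => p.take k <:+ p.take q ++ [p.getD q ""]) q by rw [htake]]
  exact pv_snoc_max p (p.take q) _ (pvPi p q) q (pvPi_suffix p q)
    (fun k hk hs => pvPi_greatest p q k (by omega) hs) (by have := pvPi_le p q; omega) (by omega)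

theorem pvNext_shift (p : List String) (r : Nat) (c : String) (hq : 0 < r)
    (hne : p.getD r "" ≠ c) : pvNext p r c = pvNext p (pvPi p r) c := by
  apply pv_fg_ext
  · rintro k hk hkb ⟨-, hsu, hgc⟩
    have hkr : k - 1 ≠ r := by
      intro hEq; exact hne (by rw [← hEq]; exact hgc)
    have hk1 : k - 1 ≤ pvPi p r := pvPi_greatest p r (k-1) (by omega) hsu
    refine ⟨by omega, hk, ?_, hgc⟩
    apply pv_suffix_of_suffix _ _ (p.take r) hsu (pvPi_suffix p r)
    simp [List.length_take]; omega
  · rintro k hk hkb ⟨-, hsu, hgc⟩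
    have := pvPi_le p r
    exact ⟨by omega, hk, hsu.trans (pvPi_suffix p r), hgc⟩

theorem pvWhileB_fuel (p : List String) (fail : List Nat) (c : String) (K : Nat)
    (hwf : ∀ j, j < K → fail.getD j 0 ≤ j) :
    ∀ k, k ≤ K → ∀ f1 f2, k ≤ f1 → k ≤ f2 →
      pvWhileB p fail c f1 k = pvWhileB p fail c f2 k := by
  intro k
  induction k using Nat.strong_induction_on with
  | _ k ih =>
    intro hkK f1 f2 h1 h2
    by_cases hcond : (k != 0 && !(c == p.getD k "")) = true
    · have hk0 : 0 < k := by
        rcases Nat.eq_zero_or_pos k with h | h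
        · subst h; simp at hcond
        · exact h
      obtain ⟨f1', rfl⟩ : ∃ f1', f1 = f1' + 1 := ⟨f1 - 1, by omega⟩
      obtain ⟨f2', rfl⟩ : ∃ f2', f2 = f2' + 1 := ⟨f2 - 1, by omega⟩
      rw [pvWhileB, pvWhileB, if_pos hcond, if_pos hcond]
      have hlt : fail.getD (k-1) 0 ≤ k - 1 := hwf (k-1) (by omega)
      exact ih (fail.getD (k-1) 0) (by omega) (by omega) f1' f2' (by omega) (by omega)
    · match f1, f2 with
      | 0, 0 => rfl
      | 0, f2+1 => rw [pvWhileB, pvWhileB, if_neg hcond]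
      | f1+1, 0 => rw [pvWhileB, pvWhileB, if_neg hcond]
      | f1+1, f2+1 => rw [pvWhileB, pvWhileB, if_neg hcond, if_neg hcond]

theorem pvStepB_spec (p : List String) (fail : List Nat) (c : String) (q0 : Nat)
    (hq0 : q0 < p.length) (hs : ∀ j, j < q0 → fail.getD j 0 = pvPi p (j+1)) :
    pvStepB p fail q0 c = pvNext p q0 c := by
  induction q0 using Nat.strong_induction_on with
  | _ q0 ih =>
    rcases Nat.eq_zero_or_pos q0 with h0 | hpos
    · subst h0
      show (if c == p.getD (pvWhileB p fail c 0 0) "" then _ + 1 else _) = _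
      rw [show pvWhileB p fail c 0 0 = 0 from rfl]
      by_cases hc : p.getD 0 "" = c
      · rw [if_pos (by simp only [beq_iff_eq]; exact hc.symm)]
        have h1 := Nat.le_findGreatest (P := fun k => 0 < k ∧ p.take (k-1) <:+ p.take 0 ∧ p.getD (k-1) "" = c)
          (n := 0+1) (m := 0+1) (by omega) ⟨one_pos, List.nil_suffix, hc⟩
        have h2 := Nat.findGreatest_le (n := 0+1) (P := fun k => 0 < k ∧ p.take (k-1) <:+ p.take 0 ∧ p.getD (k-1) "" = c)
        unfold pvNext
        omega
      · rw [if_neg (by simp only [beq_iff_eq]; exact fun h => hc h.symm)]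
        unfold pvNext
        symm
        apply Nat.findGreatest_eq_zero_iff.2
        intro n hn hle hP
        have : n = 1 := by omega
        subst this
        exact hc hP.2.2
    · by_cases hc : p.getD q0 "" = c
      · -- while stops immediately, step returns q0+1
        obtain ⟨f', rfl⟩ : ∃ f', q0 = f' + 1 := ⟨q0 - 1, by omega⟩
        have hw : pvWhileB p fail c (f'+1) (f'+1) = f'+1 := by
          rw [pvWhileB, if_neg (by
            simp only [Bool.and_eq_true, Bool.not_eq_true', beq_eq_false_iff_ne, ne_eq]
            rintro ⟨-, h⟩
            exact h hc.symm)]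
        show (if c == p.getD (pvWhileB p fail c (f'+1) (f'+1)) "" then _ + 1 else _) = _
        rw [hw, if_pos (by simp only [beq_iff_eq]; exact hc.symm)]
        have h1 := Nat.le_findGreatest (P := fun k => 0 < k ∧ p.take (k-1) <:+ p.take (f'+1) ∧ p.getD (k-1) "" = c)
          (n := f'+1+1) (m := f'+1+1) (by omega) ⟨by omega, List.suffix_refl _, by simpa using hc⟩
        have h2 := Nat.findGreatest_le (n := f'+1+1) (P := fun k => 0 < k ∧ p.take (k-1) <:+ p.take (f'+1) ∧ p.getD (k-1) "" = c)
        unfold pvNext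
        omega
      · -- while steps to fail[q0-1] = pvPi p q0
        have hj : fail.getD (q0-1) 0 = pvPi p q0 := by
          have := hs (q0-1) (by omega)
          rwa [Nat.sub_add_cancel hpos] at this
        have hwf : ∀ j, j < q0 → fail.getD j 0 ≤ j := by
          intro j hjq
          rw [hs j hjq]
          have := pvPi_le p (j+1)
          omega
        obtain ⟨f', rfl⟩ : ∃ f', q0 = f' + 1 := ⟨q0 - 1, by omega⟩
        have hstep1 : pvWhileB p fail c (f'+1) (f'+1)
            = pvWhileB p fail c f' (fail.getD f' 0) := by
          rw [pvWhileB, if_pos (by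
            simp only [Bool.and_eq_true, Bool.not_eq_true', beq_eq_false_iff_ne, ne_eq, bne_iff_ne]
            exact ⟨by omega, fun h => hc h.symm⟩)]
          simp only [Nat.add_sub_cancel]
        have hj' : fail.getD f' 0 = pvPi p (f'+1) := by simpa using hj
        have hle : pvPi p (f'+1) ≤ f' := by have := pvPi_le p (f'+1); omega
        have hfuel : pvWhileB p fail c f' (fail.getD f' 0)
            = pvWhileB p fail c (pvPi p (f'+1)) (pvPi p (f'+1)) := by
          rw [hj']
          exact pvWhileB_fuel p fail c (f'+1) hwf _ (by omega) _ _ (by omega) (by omega)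
        have hq' : pvPi p (f'+1) < f'+1 := by omega
        have : pvStepB p fail (f'+1) c = pvStepB p fail (pvPi p (f'+1)) c := by
          show (if c == p.getD (pvWhileB p fail c (f'+1) (f'+1)) "" then _ + 1 else _) = _
          rw [hstep1, hfuel]
          rfl
        rw [this, ih (pvPi p (f'+1)) hq' (by omega) (fun j hjlt => hs j (by omega))]
        exact (pvNext_shift p (f'+1) c hpos hc).symm

theorem pvFailB_aux (p : List String) :
    ∀ q : Nat, 1 ≤ q → q ≤ p.length →
      (PySem.List.pyRange 1 (q : Int) 1).foldl
        (fun (st : List Nat × Nat) qq =>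
          let k := pvStepB p st.1 st.2 (PySem.List.pyGetD p qq "")
          (st.1 ++ [k], k))
        ([0], 0)
      = ((List.range q).map (fun j => pvPi p (j+1)), pvPi p q) := by
  intro q
  induction q with
  | zero => omega
  | succ q ih =>
    intro _ hle
    rcases Nat.eq_zero_or_pos q with h0 | hq1
    · subst h0
      rw [PySem.List.pyRange_one_eq_nil (by norm_num)]
      simp [pvPi]
    · have hsplit : PySem.List.pyRange 1 ((q+1 : Nat) : Int) 1
        = PySem.List.pyRange 1 (q : Int) 1 ++ [(q : Int)] := by
        push_cast
        rw [PySem.List.pyRange_one_succ_right (by exact_mod_cast hq1)]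
      rw [hsplit, List.foldl_append, ih hq1 (by omega)]
      simp only [List.foldl_cons, List.foldl_nil]
      have hget : PySem.List.pyGetD p (q : Int) "" = p.getD q "" := PySem.List.pyGetD_natCast p q ""
      have hstep : pvStepB p ((List.range q).map (fun j => pvPi p (j+1))) (pvPi p q) (PySem.List.pyGetD p (q : Int) "")
          = pvPi p (q+1) := by
        rw [hget]
        rw [pvStepB_spec p _ _ (pvPi p q) (by have := pvPi_le p q; omega)
          (fun j hj => by
            rw [List.getD_eq_getElem?_getD, List.getElem?_map, List.getElem?_range (by have := pvPi_le p q; omega)]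
            rfl)]
        exact (pvPi_succ p q hq1 (by omega)).symm
      rw [hstep]
      congr 1
      rw [List.range_succ, List.map_append]
      rfl

theorem pvFailB_spec (p : List String) (hm : 0 < p.length) :
    ∀ j, j < p.length → (pvFailB p).getD j 0 = pvPi p (j+1) := by
  intro j hj
  unfold pvFailB
  rw [show ((p.length : Int)) = ((p.length : Nat) : Int) from rfl]
  rw [pvFailB_aux p p.length hm le_rfl]
  show ((List.range p.length).map (fun j => pvPi p (j+1))).getD j 0 = _
  rw [List.getD_eq_getElem?_getD, List.getElem?_map, List.getElem?_range hj]
  rfl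

theorem pvNaive_match (p text : List String) (s : Nat) (hm : 0 < p.length)
    (hle : s + p.length ≤ text.length) (hw : (text.drop s).take p.length = p) :
    pvNaive p text s = s :: pvNaive p text (s + p.length) := by
  rw [pvNaive, dif_pos ⟨hle, hm⟩, if_pos hw]

theorem pvNaive_stop (p text : List String) (f : Nat) (hm : 0 < p.length)
    (hno : ∀ s, f ≤ s → s + p.length ≤ text.length → (text.drop s).take p.length ≠ p) :
    pvNaive p text f = [] := by
  by_cases h : f + p.length ≤ text.length
  · rw [pvNaive, dif_pos ⟨h, hm⟩, if_neg (hno f le_rfl h)]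
    exact pvNaive_stop p text (f+1) hm (fun s hs hsl => hno s (by omega) hsl)
  · rw [pvNaive, dif_neg (by omega)]
termination_by text.length - f
decreasing_by omega

theorem pvNaive_skip (p text : List String) (f s0 : Nat) (hm : 0 < p.length) (hfs : f ≤ s0)
    (hno : ∀ s, f ≤ s → s < s0 → s + p.length ≤ text.length → (text.drop s).take p.length ≠ p) :
    pvNaive p text f = pvNaive p text s0 := by
  rcases Nat.eq_or_lt_of_le hfs with rfl | hlt
  · rfl
  · by_cases h : f + p.length ≤ text.length
    · rw [pvNaive, dif_pos ⟨h, hm⟩, if_neg (hno f le_rfl hlt h)]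
      exact pvNaive_skip p text (f+1) s0 hm (by omega)
        (fun s hs hs0 hsl => hno s (by omega) hs0 hsl)
    · rw [pvNaive, dif_neg (by omega)]
      rw [pvNaive, dif_neg (by omega)]
termination_by s0 - f
decreasing_by omega

theorem pv_window_of_suffix (p text : List String) (i : Nat) (h : p <:+ text.take i)
    (hi : i ≤ text.length) :
    (text.drop (i - p.length)).take p.length = p := by
  have hlen : p.length ≤ i := by
    have := h.length_le
    rw [List.length_take] at this
    omega
  rw [List.suffix_iff_eq_drop] at h
  rw [List.length_take, min_eq_left hi] at h
  rw [List.take_drop]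
  rw [show i - p.length + p.length = i by omega]
  exact h.symm

theorem pv_suffix_of_window (p text : List String) (f s i : Nat) (hfs : f ≤ s)
    (hsi : s + p.length = i) (hi : i ≤ text.length)
    (hw : (text.drop s).take p.length = p) :
    p <:+ (text.take i).drop f := by
  have hp : p = (text.take i).drop s := by
    rw [← hw, List.take_drop, hsi]
  have : (text.take i).drop s = ((text.take i).drop f).drop (s - f) := by
    rw [List.drop_drop]
    congr 1
    omega
  rw [hp, this]
  exact List.drop_suffix _ _

theorem pv_w_getD (aw : List (Int × Int × String × String)) (i m j : Nat)
    (hj : j < m) (hin : i + m ≤ aw.length) :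
    (((aw.map pvProj).drop i).take m).getD j pvTokD = pvProj (pvGetA aw (i+j)) := by
  have hlen : i + j < aw.length := by omega
  rw [List.getD_eq_getElem?_getD, List.getElem?_take_of_lt hj,
    List.getElem?_drop, List.getElem?_map, List.getElem?_eq_getElem hlen]
  unfold pvGetA
  rw [List.getD_eq_getElem?_getD, List.getElem?_eq_getElem hlen]
  rfl

theorem pv_window_iff (aw : List (Int × Int × String × String)) (pat : List String) (i : Nat)
    (h : i + pat.length ≤ aw.length) :
    ((List.range pat.length).all (fun j => (pvGetA aw (i+j)).2.2.2 == pat.getD j "")) = true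
    ↔ ((aw.map (fun t => t.2.2.2)).drop i).take pat.length = pat := by
  rw [List.all_eq_true]
  constructor
  · intro hall
    apply List.ext_getElem
    · rw [List.length_take, List.length_drop, List.length_map]; omega
    · intro j hj1 hj2
      have hjm : j < pat.length := hj2
      have := hall j (List.mem_range.2 hjm)
      rw [beq_iff_eq] at this
      rw [List.getElem_take, List.getElem_drop, List.getElem_map]
      rw [show (pvGetA aw (i+j)).2.2.2 = aw[i+j].2.2.2 by
        unfold pvGetA; rw [List.getD_eq_getElem?_getD, List.getElem?_eq_getElem (by omega)]; rfl] at this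
      rw [this, List.getD_eq_getElem?_getD, List.getElem?_eq_getElem hjm]
      rfl
  · intro heq j hjm
    rw [List.mem_range] at hjm
    rw [beq_iff_eq]
    have := congrArg (fun l => l[j]?) heq
    simp only at this
    rw [List.getElem?_take_of_lt hjm, List.getElem?_drop, List.getElem?_map,
      List.getElem?_eq_getElem (show i+j < aw.length by omega)] at this
    rw [show (pvGetA aw (i+j)).2.2.2 = aw[i+j].2.2.2 by
      unfold pvGetA; rw [List.getD_eq_getElem?_getD, List.getElem?_eq_getElem (by omega)]; rfl]
    rw [List.getD_eq_getElem?_getD, ← this]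
    rfl

theorem pv_w_len (aw : List (Int × Int × String × String)) (i m : Nat) (hin : i + m ≤ aw.length) :
    (((aw.map pvProj).drop i).take m).length = m := by
  rw [List.length_take, List.length_drop, List.length_map]; omega

theorem pvEmitA (aw : List (Int × Int × String × String)) (i m : Nat) (hm : 0 < m)
    (hin : i + m ≤ aw.length) (acc : List (Int × Int × Int)) :
    (if (pvGetA aw i).1 == (pvGetA aw (i+m-1)).1 then
      acc ++ [((pvGetA aw i).1, (pvGetA aw i).2.1, (pvGetA aw (i+m-1)).2.1)]
    else
      (List.range m).foldl
        (fun a k => a ++ [((pvGetA aw (i+k)).1, (pvGetA aw (i+k)).2.1, (pvGetA aw (i+k)).2.1)]) acc)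
    = acc ++ pvEmit (aw.map pvProj) m i := by
  unfold pvEmit
  have h0 : (((aw.map pvProj).drop i).take m).getD 0 pvTokD = pvProj (pvGetA aw i) := by
    have := pv_w_getD aw i m 0 hm hin
    simpa using this
  have hl : (((aw.map pvProj).drop i).take m).getD (m-1) pvTokD = pvProj (pvGetA aw (i+m-1)) := by
    have := pv_w_getD aw i m (m-1) (by omega) hin
    rw [show i + (m-1) = i+m-1 from by omega] at this
    exact this
  rw [h0, hl]
  have hc : ((pvProj (pvGetA aw i)).1 == (pvProj (pvGetA aw (i+m-1))).1)
      = ((pvGetA aw i).1 == (pvGetA aw (i+m-1)).1) := rfl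
  by_cases hcond : ((pvGetA aw i).1 == (pvGetA aw (i+m-1)).1) = true
  · rw [if_pos hcond, if_pos (by rw [hc]; exact hcond)]
    rfl
  · rw [if_neg hcond, if_neg (by rw [hc]; exact hcond)]
    rw [PySem.List.foldl_append_singleton_eq_map]
    congr 1
    apply List.ext_getElem
    · rw [List.length_map, List.length_range, List.length_map, pv_w_len aw i m hin]
    · intro j hj1 hj2
      rw [List.length_map, List.length_range] at hj1
      simp only [List.getElem_map, List.getElem_range]
      have hwj : (((aw.map pvProj).drop i).take m)[j]'(by rw [pv_w_len aw i m hin]; exact hj1)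
          = pvProj (pvGetA aw (i+j)) := by
        have h := pv_w_getD aw i m j hj1 hin
        rw [List.getD_eq_getElem?_getD, List.getElem?_eq_getElem (by rw [pv_w_len aw i m hin]; exact hj1)] at h
        simpa using h
      rw [hwj]
      rfl

theorem pvLoopA_eq (aw : List (Int × Int × String × String)) (pat : List String)
    (hm : 0 < pat.length) :
    ∀ (fuel i : Nat) (acc : List (Int × Int × Int)), aw.length + 1 ≤ fuel + i →
      pvLoopA aw pat pat.length aw.length i acc fuel
        = acc ++ pvEmitAll (aw.map pvProj) pat.length
            (pvNaive pat (aw.map (fun t => t.2.2.2)) i) := by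
  intro fuel
  induction fuel with
  | zero =>
    intro i acc hfi
    rw [pvLoopA, pvNaive, dif_neg (by rw [List.length_map]; omega)]
    simp [pvEmitAll]
  | succ fuel ih =>
    intro i acc hfi
    rw [pvLoopA]
    by_cases hle : i + pat.length ≤ aw.length
    · rw [if_pos hle]
      by_cases hwin : ((List.range pat.length).all
          (fun j => (pvGetA aw (i+j)).2.2.2 == pat.getD j "")) = true
      · rw [if_pos hwin]
        have hw := (pv_window_iff aw pat i hle).1 hwin
        have hstep := pvNaive_match pat (aw.map (fun t => t.2.2.2)) i hm
          (by rw [List.length_map]; omega) hw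
        rw [pvEmitA aw i pat.length hm hle acc]
        rw [ih (i + pat.length) _ (by omega), hstep]
        simp [pvEmitAll, List.append_assoc]
      · rw [if_neg hwin]
        rw [ih (i+1) acc (by omega)]
        rw [show pvNaive pat (aw.map (fun t => t.2.2.2)) i
            = pvNaive pat (aw.map (fun t => t.2.2.2)) (i+1) by
          rw [pvNaive, dif_pos ⟨by rw [List.length_map]; omega, hm⟩,
            if_neg (fun hh => hwin ((pv_window_iff aw pat i hle).2 hh))]]
    · rw [if_neg hle]
      rw [pvNaive, dif_neg (by rw [List.length_map]; omega)]
      simp [pvEmitAll]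

theorem pvScanB_inv (p : List String) (fail : List Nat) (toksAll : List (Int × Int × String))
    (hm : 0 < p.length)
    (hfs : ∀ j, j < p.length → fail.getD j 0 = pvPi p (j+1)) :
    ∀ (rest : List (Int × Int × String)) (i q : Nat) (out : List (Int × Int × Int)) (f : Nat),
      rest = toksAll.drop i → f ≤ i → i ≤ toksAll.length →
      q = pvMf p (((toksAll.map (fun t => t.2.2)).take i).drop f) → q < p.length →
      (∀ s, f ≤ s → s + p.length ≤ i →
        ((toksAll.map (fun t => t.2.2)).drop s).take p.length ≠ p) →
      pvScanB p fail p.length toksAll rest i q out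
        = out ++ pvEmitAll toksAll p.length (pvNaive p (toksAll.map (fun t => t.2.2)) f) := by
  intro rest
  induction rest with
  | nil =>
    intro i q out f hrest hfi hin hq hqm hno
    have hni : toksAll.length ≤ i := by
      have := congrArg List.length hrest
      rw [List.length_drop] at this
      simp at this
      omega
    rw [pvScanB, pvNaive_stop p _ f hm (fun s hs hsl => hno s hs (by
      rw [List.length_map] at hsl; omega))]
    simp [pvEmitAll]
  | cons t rest' ih =>
    intro i q out f hrest hfi hin hq hqm hno
    -- decompose the position
    have hi : i < toksAll.length := by
      by_contra hcon
      rw [List.drop_eq_nil_of_le (by omega)] at hrest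
      exact List.cons_ne_nil _ _ hrest
    have ht : toksAll[i]? = some t := by
      rw [← List.head?_drop, ← hrest]
      rfl
    have hrest' : rest' = toksAll.drop (i+1) := by
      rw [← List.tail_drop, ← hrest]
      rfl
    have htext : (toksAll.map (fun t => t.2.2)).length = toksAll.length := by simp
    have hc : (toksAll.map (fun t => t.2.2))[i]? = some t.2.2 := by
      rw [List.getElem?_map, ht]
      rfl
    have hu' : ((toksAll.map (fun t => t.2.2)).take (i+1)).drop f
        = (((toksAll.map (fun t => t.2.2)).take i).drop f) ++ [t.2.2] := by
      rw [List.take_add_one, hc]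
      show (_ ++ [t.2.2]).drop f = _
      rw [List.drop_append_of_le_length (by rw [List.length_take]; omega)]
    have hq1 : pvStepB p fail q t.2.2
        = pvMf p (((toksAll.map (fun t => t.2.2)).take (i+1)).drop f) := by
      rw [pvStepB_spec p fail _ q hqm (fun j hj => hfs j (by omega)), hq, hu']
      exact (pvMf_snoc p _ _ (by rw [← hq]; exact hqm)).symm
    rw [pvScanB]
    by_cases hqe : (pvStepB p fail q t.2.2 == p.length) = true
    · rw [if_pos hqe]
      have hqem : pvMf p (((toksAll.map (fun t => t.2.2)).take (i+1)).drop f) = p.length := by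
        rw [← hq1]; exact eq_of_beq hqe
      have hpm : p <:+ ((toksAll.map (fun t => t.2.2)).take (i+1)).drop f := by
        have := pvMf_suffix p (((toksAll.map (fun t => t.2.2)).take (i+1)).drop f)
        rwa [hqem, List.take_length] at this
      have hlen : p.length + f ≤ i + 1 := by
        have := hpm.length_le
        rw [List.length_drop, List.length_take] at this
        omega
      have hwin : ((toksAll.map (fun t => t.2.2)).drop (i+1-p.length)).take p.length = p :=
        pv_window_of_suffix p _ (i+1) (hpm.trans (List.drop_suffix _ _)) (by omega)
      have hnaive : pvNaive p (toksAll.map (fun t => t.2.2)) f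
          = (i+1-p.length) :: pvNaive p (toksAll.map (fun t => t.2.2)) (i+1) := by
        rw [pvNaive_skip p _ f (i+1-p.length) hm (by omega)
          (fun s hs hslt hsl => hno s hs (by omega))]
        rw [pvNaive_match p _ _ hm (by omega) hwin]
        congr 2
        omega
      -- the slice is the window
      have hslice : PySem.List.slice toksAll (some ((i : Int) + 1 - (p.length : Int))) (some ((i : Int) + 1))
          = (toksAll.drop (i+1-p.length)).take p.length := by
        rw [show ((i : Int) + 1 - (p.length : Int)) = ((i+1-p.length : Nat) : Int) by push_cast; omega,
          show ((i : Int) + 1) = ((i+1 : Nat) : Int) by push_cast; ring,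
          PySem.List.slice_natCast]
        congr 1
        omega
      have hlast : ((toksAll.drop (i+1-p.length)).take p.length).getD (p.length-1) pvTokD = t := by
        rw [List.getD_eq_getElem?_getD, List.getElem?_take_of_lt (by omega), List.getElem?_drop,
          show i+1-p.length + (p.length-1) = i by omega, ht]
        rfl
      have hw0 : PySem.List.pyGetD ((toksAll.drop (i+1-p.length)).take p.length) 0 ((0:Int), (0:Int), "")
          = ((toksAll.drop (i+1-p.length)).take p.length).getD 0 pvTokD := by
        rw [show ((0 : Int)) = ((0 : Nat) : Int) from rfl, PySem.List.pyGetD_natCast]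
        rfl
      rw [hslice, hw0]
      have hout' : (if (((toksAll.drop (i+1-p.length)).take p.length).getD 0 pvTokD).1 == t.1 then
            out ++ [(t.1, (((toksAll.drop (i+1-p.length)).take p.length).getD 0 pvTokD).2.1, t.2.1)]
          else out ++ ((toksAll.drop (i+1-p.length)).take p.length).map (fun x => (x.1, x.2.1, x.2.1)))
          = out ++ pvEmit toksAll p.length (i+1-p.length) := by
        unfold pvEmit
        rw [hlast]
        by_cases hcnd : ((((toksAll.drop (i+1-p.length)).take p.length).getD 0 pvTokD).1 == t.1) = true
        · rw [if_pos hcnd, if_pos hcnd, eq_of_beq hcnd]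
        · rw [if_neg hcnd, if_neg hcnd]
      rw [hout']
      rw [ih (i+1) 0 _ (i+1) hrest' le_rfl (by omega)
        (by rw [List.drop_eq_nil_of_le (by rw [List.length_take]; omega), pvMf_nil p hm])
        hm (fun s hs hsl => by omega)]
      rw [hnaive]
      simp [pvEmitAll, List.append_assoc]
    · rw [if_neg hqe]
      have hq1m : pvStepB p fail q t.2.2 < p.length := by
        have h1 : pvStepB p fail q t.2.2 ≤ p.length := by rw [hq1]; exact pvMf_le _ _
        have h2 : pvStepB p fail q t.2.2 ≠ p.length := by
          intro hcEq; exact hqe (by rw [hcEq]; exact beq_self_eq_true _)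
        omega
      apply ih (i+1) _ out f hrest' (by omega) (by omega) hq1 hq1m
      intro s hs hsl
      by_cases hcase : s + p.length ≤ i
      · exact hno s hs hcase
      · have hseq : s + p.length = i+1 := by omega
        intro hwmatch
        have hsuf : p <:+ ((toksAll.map (fun t => t.2.2)).take (i+1)).drop f :=
          pv_suffix_of_window p _ f s (i+1) hs hseq (by rw [htext]; omega) hwmatch
        have hge := pvMf_greatest p (((toksAll.map (fun t => t.2.2)).take (i+1)).drop f)
          p.length le_rfl (by rw [List.take_length]; exact hsuf)
        rw [← hq1] at hge
        omega

-- ---- tokenization agreement ----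
theorem pvAllWords_flat (lines : List String) :
    pvAllWords lines = (PySem.List.enumerate lines).flatMap
      (fun le => (PySem.List.enumerate (PySem.Str.split₀ le.2)).map
        (fun we => (le.1, we.1, we.2, pvCleanA we.2))) := by
  unfold pvAllWords
  simp only [PySem.List.foldl_append_singleton_eq_map]
  rw [PySem.List.foldl_append_eq_flatMap]
  rfl

theorem pvToks_rel (lines : List String) :
    pvToksB lines = (pvAllWords lines).map pvProj := by
  rw [pvAllWords_flat, pvToksB, List.map_flatMap]
  congr 1
  funext le
  rw [List.map_map]
  rfl

-- ===== VERDICT (by name: the statement is the Claim_ definition above) =====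
theorem find_phrase_positions_spec : Claim_equal_find_phrase_positions := by
  intro lines phrase _hD hP
  unfold Pre_find_phrase_positions at hP
  unfold Spec_find_phrase_positions
  show find_phrase_positions lines phrase = find_phrase_positions_alt lines phrase
  simp only [find_phrase_positions, find_phrase_positions_alt]
  have hm : 0 < (phrase.map pvCleanA).length := by
    rw [List.length_map]
    exact List.length_pos_iff.2 hP
  rw [pvCleanB_eq, pvToks_rel]
  rw [pvLoopA_eq (pvAllWords lines) (phrase.map pvCleanA) hm ((pvAllWords lines).length + 1) 0 [] (by omega)]
  rw [pvScanB_inv (phrase.map pvCleanA) (pvFailB (phrase.map pvCleanA)) ((pvAllWords lines).map pvProj) hm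
    (pvFailB_spec (phrase.map pvCleanA) hm)
    ((pvAllWords lines).map pvProj) 0 0 [] 0 rfl le_rfl (by omega)
    (by rw [List.take_zero, List.drop_nil, pvMf_nil _ hm]) hm
    (fun s hs hsl => by omega)]
  rw [show (((pvAllWords lines).map pvProj).map (fun t => t.2.2))
      = ((pvAllWords lines).map (fun t => t.2.2.2)) from by rw [List.map_map]; rfl]
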